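-- pv_equiv track=rewrite | github.com/chenye95/LeetCode_Progress | 1461_StringContainBinarySizeK.py | has_all_codes_bits
-- ===== SOURCE A (Python) =====
-- def has_all_codes_bits(s: str, k: int) -> bool:
--     if len(s) - k + 1 < 1 << k:
--         return False
--
--     need_to_find = 1 << k
--     find_in_string = [False] * need_to_find
--     binary_all_one = need_to_find - 1
--     current_val = 0
--
--     for i, s_i in enumerate(s):
--         current_val = (current_val << 1) & binary_all_one
--         if s_i == '1':
--             current_val |= 1
--
--         if i >= k - 1 and not find_in_string[current_val]:
--             find_in_string[current_val] = True
--             need_to_find -= 1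
--             if need_to_find == 0:
--                 return True
--
--     return False
-- ===== SOURCE B (Python) =====
-- def has_all_codes_bits(s: str, k: int) -> bool:
--     total = 1 << k
--     if len(s) - k + 1 < total:
--         return False
--     seen = set()
--     for i in range(len(s) - k + 1):
--         value = 0
--         for c in s[i:i + k]:
--             value = value * 2 + (c == '1')
--         seen.add(value)
--     return len(seen) == total
-- ===== Notes on version B (the rewrite author's own statement) =====
-- stated objective: simpler
-- what changed: Replaces the rolling bitmask with boolean found-table, remaining counter and early exit by a direct pass that recomputes each length-k window's value into a set and compares the set's size with 2^k.
-- intended difference: On the single input s='' with k=0 A returns False although the empty string does contain the one length-0 code (the empty window s[0:0]); B returns True, the count-based intended answer. — e.g. on has_all_codes_bits("", 0): A returns false, B returns true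
import Mathlib
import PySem

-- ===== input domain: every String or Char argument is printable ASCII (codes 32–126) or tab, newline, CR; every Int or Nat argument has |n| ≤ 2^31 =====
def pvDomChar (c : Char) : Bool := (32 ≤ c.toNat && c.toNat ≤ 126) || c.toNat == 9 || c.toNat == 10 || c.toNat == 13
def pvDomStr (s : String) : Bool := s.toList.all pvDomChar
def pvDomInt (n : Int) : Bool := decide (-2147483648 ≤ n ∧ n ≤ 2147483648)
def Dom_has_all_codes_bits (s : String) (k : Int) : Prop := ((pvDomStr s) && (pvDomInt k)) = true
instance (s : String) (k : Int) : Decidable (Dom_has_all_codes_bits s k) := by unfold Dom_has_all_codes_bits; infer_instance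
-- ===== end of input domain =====

-- B replaces A's rolling bitmask + found-table + countdown + early exit by a set of per-window
-- values compared against 2^k (objective: simpler; not faster).

-- ===== PORT A =====
-- loop over enumerate(s): state = (index i, current_val, find_in_string, need_to_find).
-- current_val, need_to_find are nonnegative Python ints throughout; kept as Nat (<<< &&& ||| agree with Python on nonnegatives).
-- Python's find_in_string[current_val] raises IndexError when out of range (only reachable at k = 0, excluded by Pre_);
-- getD is exact whenever Python does not raise.
def pyAllCodesLoop (k : Int) (mask : Nat) : List Char → Nat → Nat → List Bool → Nat → Bool
  | [], _, _, _, _ => false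
  | c :: rest, i, current_val, find_in_string, need_to_find =>
    let v1 := (current_val <<< 1) &&& mask
    let v2 := if c = '1' then v1 ||| 1 else v1
    if decide (k - 1 ≤ (i : Int)) && !(find_in_string.getD v2 false) then
      let find' := find_in_string.set v2 true
      let need' := need_to_find - 1
      if need' = 0 then true
      else pyAllCodesLoop k mask rest (i + 1) v2 find' need'
    else pyAllCodesLoop k mask rest (i + 1) v2 find_in_string need_to_find

-- 1 << k (Python int, value 2^k for k ≥ 0) is computed as a Nat shift and cast where an Int is compared.
def has_all_codes_bits (s : String) (k : Int) : Bool :=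
  if (s.toList.length : Int) - k + 1 < ((1 <<< k.toNat : Nat) : Int) then false
  else
    let need := (1 : Nat) <<< k.toNat
    pyAllCodesLoop k (need - 1) s.toList 0 0 (List.replicate need false) need

-- ===== PORT B =====
def has_all_codes_bits_alt (s : String) (k : Int) : Bool :=
  let total : Int := ((1 <<< k.toNat : Nat) : Int)
  if (s.toList.length : Int) - k + 1 < total then false
  else
    let seen : PySem.Set Int :=
      (PySem.List.pyRange 0 ((s.toList.length : Int) - k + 1) 1).foldl
        (fun seen i =>
          PySem.Set.add seen
            ((PySem.List.slice s.toList (some i) (some (i + k))).foldl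
              (fun v c => v * 2 + (if c = '1' then 1 else 0)) (0 : Int)))
        PySem.Set.empty
    ((seen.length : Int) == total)

-- ===== PRECONDITION & SPEC =====
-- A raises (never returns) exactly on: k < 0 (ValueError from 1 << k) and k = 0 with s starting
-- with '1' (IndexError: the table has size 1 but current_val is forced to 1). Pre_ excludes only these.
def Pre_has_all_codes_bits (s : String) (k : Int) : Prop :=
  0 ≤ k ∧ ¬(k = 0 ∧ s.toList.head? = some '1')
instance (s : String) (k : Int) : Decidable (Pre_has_all_codes_bits s k) := by
  unfold Pre_has_all_codes_bits; infer_instance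

def pvWitness_has_all_codes_bits : String × Int := ("0110", 1)

-- On the single input s = "" with k = 0 A returns False although the empty string does contain the
-- one length-0 code (the empty window s[0:0]); B returns True, the count-based intended answer.
def D_has_all_codes_bits (s : String) (k : Int) : Prop := s = "" ∧ k = 0
instance (s : String) (k : Int) : Decidable (D_has_all_codes_bits s k) := by
  unfold D_has_all_codes_bits; infer_instance

def Spec_has_all_codes_bits (s : String) (k : Int) (out : Bool) : Prop :=
  ¬ D_has_all_codes_bits s k → out = has_all_codes_bits_alt s k
instance (s : String) (k : Int) (out : Bool) : Decidable (Spec_has_all_codes_bits s k out) := by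
  unfold Spec_has_all_codes_bits; infer_instance

def pvDiffWitness_has_all_codes_bits : String × Int := ("", 0)
def pvDiffWitnessOut_has_all_codes_bits : Bool × Bool := (false, true)

-- ===== CLAIM (what is proved, stated in full; the proofs are below) =====
def Claim_unchanged_has_all_codes_bits : Prop := ∀ (s : String) (k : Int), Dom_has_all_codes_bits s k → Pre_has_all_codes_bits s k → Spec_has_all_codes_bits s k (has_all_codes_bits s k)
def Claim_changed_has_all_codes_bits : Prop := Dom_has_all_codes_bits (pvDiffWitness_has_all_codes_bits.1) (pvDiffWitness_has_all_codes_bits.2) ∧ Pre_has_all_codes_bits (pvDiffWitness_has_all_codes_bits.1) (pvDiffWitness_has_all_codes_bits.2) ∧ D_has_all_codes_bits (pvDiffWitness_has_all_codes_bits.1) (pvDiffWitness_has_all_codes_bits.2) ∧ has_all_codes_bits (pvDiffWitness_has_all_codes_bits.1) (pvDiffWitness_has_all_codes_bits.2) = pvDiffWitnessOut_has_all_codes_bits.1 ∧ has_all_codes_bits_alt (pvDiffWitness_has_all_codes_bits.1) (pvDiffWitness_has_all_codes_bits.2) = pvDiffWitnessOut_has_all_codes_bits.2 ∧ pvDiffWitnessOut_has_all_codes_bits.1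 ≠ pvDiffWitnessOut_has_all_codes_bits.2
def Claim_exact_has_all_codes_bits : Prop := ∀ (s : String) (k : Int), Dom_has_all_codes_bits s k → Pre_has_all_codes_bits s k → D_has_all_codes_bits s k → has_all_codes_bits s k ≠ has_all_codes_bits_alt s k
-- ===== LEMMAS AND PROOFS =====

-- the bit value of a character and the value of a window, as A and B both compute it
def pvBit (c : Char) : Nat := if c = '1' then 1 else 0
def pvWv (l : List Char) : Nat := l.foldl (fun v c => 2 * v + pvBit c) 0
-- the values of all length-K windows of l
def pvVals (l : List Char) (K : Nat) : List Nat :=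
  (List.range (l.length + 1 - K)).map (fun j => pvWv ((l.drop j).take K))

lemma pvWv_foldl (l : List Char) (a : Nat) :
    l.foldl (fun v c => 2 * v + pvBit c) a = a * 2 ^ l.length + pvWv l := by
  induction l generalizing a with
  | nil => simp [pvWv]
  | cons c l ih =>
    show l.foldl _ (2 * a + pvBit c) = _
    rw [ih]
    have h2 : pvWv (c :: l) = pvBit c * 2 ^ l.length + pvWv l := by
      show l.foldl _ (2 * 0 + pvBit c) = _
      rw [ih]; ring_nf
    rw [h2, List.length_cons, pow_succ]
    ring

lemma pvWv_append (u w : List Char) :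
    pvWv (u ++ w) = pvWv u * 2 ^ w.length + pvWv w := by
  show (u ++ w).foldl _ 0 = _
  rw [List.foldl_append, pvWv_foldl]
  rfl

lemma pvWv_lt (l : List Char) : pvWv l < 2 ^ l.length := by
  induction l with
  | nil => simp [pvWv]
  | cons c l ih =>
    have h2 : pvWv (c :: l) = pvBit c * 2 ^ l.length + pvWv l := by
      show l.foldl _ (2 * 0 + pvBit c) = _
      rw [pvWv_foldl]; ring_nf
    have hb : pvBit c ≤ 1 := by unfold pvBit; split <;> simp
    rw [h2, List.length_cons, pow_succ]
    nlinarith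

lemma pv_or_one (e : Nat) (he : e % 2 = 0) : e ||| 1 = e + 1 := by
  obtain ⟨t, rfl⟩ : ∃ t, e = 2 * t := ⟨e / 2, by omega⟩
  apply Nat.eq_of_testBit_eq; intro i
  rw [Nat.testBit_or]
  cases i with
  | zero => simp [Nat.testBit_zero]
  | succ i =>
    simp only [Nat.testBit_succ]
    have h1 : (2 * t) / 2 = t := by omega
    have h2 : (2 * t + 1) / 2 = t := by omega
    have h3 : (1 : Nat) / 2 = 0 := by norm_num
    rw [h1, h2, h3]
    simp

-- one step of A's mask update, from a value already reduced mod 2^K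
lemma pv_step (K : Nat) (hK : 1 ≤ K) (a : Nat) (c : Char) :
    (if c = '1' then (((a % 2 ^ K) <<< 1) &&& (2 ^ K - 1)) ||| 1
     else ((a % 2 ^ K) <<< 1) &&& (2 ^ K - 1)) = (2 * a + pvBit c) % 2 ^ K := by
  have hpos : 0 < 2 ^ K := by positivity
  have h2 : (2 : Nat) ∣ 2 ^ K := dvd_pow_self 2 (by omega)
  have hv1 : ((a % 2 ^ K) <<< 1) &&& (2 ^ K - 1) = (2 * a) % 2 ^ K := by
    rw [Nat.shiftLeft_eq, Nat.and_two_pow_sub_one_eq_mod, pow_one]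
    have hmm := (Nat.mod_modEq a (2 ^ K)).mul_right 2
    unfold Nat.ModEq at hmm
    rw [hmm, mul_comm]
  rw [hv1]
  have hdvd : 2 ∣ (2 * a) % 2 ^ K := (Nat.dvd_mod_iff h2).mpr ⟨a, rfl⟩
  have hlt : (2 * a) % 2 ^ K < 2 ^ K := Nat.mod_lt _ hpos
  have hdm := Nat.mod_add_div (2 * a) (2 ^ K)
  unfold pvBit
  split
  · rw [pv_or_one _ (by omega)]
    have h1 : 2 * a + 1 = ((2 * a) % 2 ^ K + 1) + 2 ^ K * ((2 * a) / 2 ^ K) := by omega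
    rw [h1, Nat.add_mul_mod_self_left]
    exact (Nat.mod_eq_of_lt (by obtain ⟨m, hm⟩ := h2; omega)).symm
  · simp

lemma pv_getD_map_range (M v : Nat) (f : Nat → Bool) (hv : v < M) :
    ((List.range M).map f).getD v false = f v := by
  rw [List.getD_eq_getElem?_getD]
  simp [hv]

lemma pv_set_table (M v : Nat) (s : PySem.Set Nat) (_hv : v < M) :
    (((List.range M).map (fun x => PySem.Set.contains s x)).set v true)
      = (List.range M).map (fun x => PySem.Set.contains (PySem.Set.add s v) x) := by
  apply List.ext_getElem
  · simp
  · intro i h1 h2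
    simp only [List.length_set, List.length_map, List.length_range] at h1
    rw [List.getElem_set]
    simp only [List.getElem_map, List.getElem_range]
    split
    · next hvi =>
      subst hvi
      symm
      rw [PySem.Set.contains_iff, PySem.Set.mem_add]
      right; rfl
    · next hvi =>
      rw [Bool.eq_iff_iff, PySem.Set.contains_iff, PySem.Set.contains_iff, PySem.Set.mem_add]
      constructor
      · exact Or.inl
      · rintro (h | h)
        · exact h
        · exact absurd h.symm hvi

lemma pv_ofList_len_le (xs : List Nat) (N : Nat) (h : ∀ x ∈ xs, x < N) :
    (PySem.Set.ofList xs).length ≤ N := by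
  have hnd := PySem.Set.nodup_ofList xs
  have hsub : (PySem.Set.ofList xs).toFinset ⊆ Finset.range N := by
    intro x hx
    rw [List.mem_toFinset] at hx
    rw [Finset.mem_range]
    rw [PySem.Set.mem_ofList] at hx
    exact h x hx
  calc (PySem.Set.ofList xs).length = (PySem.Set.ofList xs).toFinset.card :=
        (List.toFinset_card_of_nodup hnd).symm
    _ ≤ (Finset.range N).card := Finset.card_le_card hsub
    _ = N := Finset.card_range N

lemma pv_ofList_take_len_le (xs : List Nat) (q : Nat) :
    (PySem.Set.ofList (xs.take q)).length ≤ (PySem.Set.ofList xs).length := by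
  conv_rhs => rw [← List.take_append_drop q xs]
  rw [PySem.Set.ofList_append, PySem.Set.update_eq_append_filter]
  simp

lemma pv_window (l : List Char) (K j : Nat) (hjK : j + K ≤ l.length) :
    pvWv (l.take (j + K)) % 2 ^ K = pvWv ((l.drop j).take K) := by
  rw [List.take_add, pvWv_append]
  have hlen : ((l.drop j).take K).length = K := by simp; omega
  rw [hlen, mul_comm, Nat.mul_add_mod]
  have hlt := pvWv_lt ((l.drop j).take K)
  rw [hlen] at hlt
  exact Nat.mod_eq_of_lt hlt

lemma pv_vals_lt (l : List Char) (K : Nat) : ∀ x ∈ pvVals l K, x < 2 ^ K := by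
  intro x hx
  unfold pvVals at hx
  obtain ⟨j, hj, rfl⟩ := List.mem_map.mp hx
  rw [List.mem_range] at hj
  have hlen : ((l.drop j).take K).length = K := by simp; omega
  have hlt := pvWv_lt ((l.drop j).take K)
  rwa [hlen] at hlt

lemma pv_length_vals (l : List Char) (K : Nat) : (pvVals l K).length = l.length + 1 - K := by
  simp [pvVals]

-- A's loop, started after i characters with the invariant state, decides whether all 2^K codes occur
lemma pv_loop (k : Int) (K : Nat) (hk : k = (K : Int)) (hK : 1 ≤ K) (l : List Char) :
    ∀ rest pre : List Char, pre ++ rest = l →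
    (PySem.Set.ofList ((pvVals l K).take (pre.length - (K - 1)))).length < 2 ^ K →
    pyAllCodesLoop k (2 ^ K - 1) rest pre.length (pvWv pre % 2 ^ K)
        ((List.range (2 ^ K)).map (fun x =>
          PySem.Set.contains (PySem.Set.ofList ((pvVals l K).take (pre.length - (K - 1)))) x))
        (2 ^ K - (PySem.Set.ofList ((pvVals l K).take (pre.length - (K - 1)))).length)
      = decide ((PySem.Set.ofList (pvVals l K)).length = 2 ^ K) := by
  subst hk
  intro rest
  induction rest with
  | nil =>
    intro pre h hfull
    have hpl : pre.length = l.length := by rw [← h]; simp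
    have htake : (pvVals l K).take (pre.length - (K - 1)) = pvVals l K := by
      apply List.take_of_length_le
      rw [pv_length_vals]
      omega
    rw [htake] at hfull
    show false = _
    symm
    rw [decide_eq_false (Nat.ne_of_lt hfull)]
  | cons c rest ih =>
    intro pre h hfull
    have hpl : pre.length + (rest.length + 1) = l.length := by
      rw [← h]; simp
    have h' : (pre ++ [c]) ++ rest = l := by simpa using h
    have h0 : (pre ++ [c]).length = pre.length + 1 := by simp
    have hv2 : (if c = '1' then (((pvWv pre % 2 ^ K) <<< 1) &&& (2 ^ K - 1)) ||| 1
        else ((pvWv pre % 2 ^ K) <<< 1) &&& (2 ^ K - 1)) = pvWv (pre ++ [c]) % 2 ^ K := by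
      rw [pv_step K hK]
      have hwc : pvWv (pre ++ [c]) = 2 * pvWv pre + pvBit c := by
        rw [pvWv_append]
        have hc : pvWv [c] = pvBit c := by
          show 2 * 0 + pvBit c = pvBit c
          omega
        rw [hc]
        simp
        ring
      rw [hwc]
    simp only [pyAllCodesLoop, hv2]
    by_cases hcond : (K : Int) - 1 ≤ (pre.length : Int)
    · -- this character completes window number pre.length - (K - 1)
      have hKp : K ≤ pre.length + 1 := by exact_mod_cast by omega
      set j := pre.length - (K - 1) with hj
      have hjK : j + K = pre.length + 1 := by omega
      have hjlt : j < (pvVals l K).length := by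
        rw [pv_length_vals]; omega
      have hwin : pvWv (pre ++ [c]) % 2 ^ K = pvWv ((l.drop j).take K) := by
        have htk : l.take (j + K) = pre ++ [c] := by
          rw [hjK, ← h, List.take_append]
          have h1 : pre.length + 1 - pre.length = 1 := by omega
          simp [h1]
        rw [← htk, pv_window l K _ (by omega)]
      set v := pvWv ((l.drop j).take K) with hvdef
      set S := PySem.Set.ofList ((pvVals l K).take j) with hSdef
      have hvlt : v < 2 ^ K := by
        have hlen : ((l.drop j).take K).length = K := by
          simp; omega
        have := pvWv_lt ((l.drop j).take K)
        rwa [hlen] at this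
      have hget : (pvVals l K)[j]'hjlt = v := by
        simp [pvVals, hvdef]
      have htake1 : (pvVals l K).take (j + 1) = (pvVals l K).take j ++ [v] := by
        rw [← hget]
        have := List.take_concat_get (show j < (pvVals l K).length from hjlt)
        rw [List.concat_eq_append] at this
        exact this.symm
      have hidx1 : (pre ++ [c]).length - (K - 1) = j + 1 := by
        rw [h0]; omega
      have hdec : decide ((K : Int) - 1 ≤ (pre.length : Int)) = true := decide_eq_true hcond
      rw [hwin, hdec, pv_getD_map_range _ _ _ hvlt]
      by_cases hmem : v ∈ S
      · have hct : PySem.Set.contains S v = true := by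
          rw [PySem.Set.contains_iff]; exact hmem
        rw [hct]
        simp only [Bool.not_true, Bool.and_false, Bool.false_eq_true, if_false]
        have hres := ih (pre ++ [c]) h'
          (by rw [hidx1, htake1, PySem.Set.ofList_append_singleton, ← hSdef,
                PySem.Set.add_of_mem hmem]; exact hfull)
        rw [hidx1, htake1, PySem.Set.ofList_append_singleton, ← hSdef,
          PySem.Set.add_of_mem hmem, h0, hwin] at hres
        exact hres
      · have hcf : PySem.Set.contains S v = false := by
          cases hcc : PySem.Set.contains S v with
          | false => rfl
          | true =>
            rw [PySem.Set.contains_iff] at hcc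
            exact absurd hcc hmem
        rw [hcf]
        simp only [Bool.not_false, Bool.and_true, if_true]
        rw [pv_set_table _ _ _ hvlt]
        have hlen1 : (PySem.Set.add S v).length = S.length + 1 := by
          rw [PySem.Set.add_of_not_mem hmem]; simp
        by_cases hz : 2 ^ K - S.length - 1 = 0
        · rw [if_pos hz]
          have hle1 : (PySem.Set.ofList ((pvVals l K).take (j + 1))).length
              ≤ (PySem.Set.ofList (pvVals l K)).length := pv_ofList_take_len_le _ _
          have hle2 : (PySem.Set.ofList (pvVals l K)).length ≤ 2 ^ K :=
            pv_ofList_len_le _ _ (pv_vals_lt l K)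
          have heq1 : (PySem.Set.ofList ((pvVals l K).take (j + 1))).length = S.length + 1 := by
            rw [htake1, PySem.Set.ofList_append_singleton, ← hSdef, hlen1]
          have heq : (PySem.Set.ofList (pvVals l K)).length = 2 ^ K := by omega
          symm
          rw [decide_eq_true heq]
        · rw [if_neg hz]
          have hres := ih (pre ++ [c]) h'
            (by rw [hidx1, htake1, PySem.Set.ofList_append_singleton, ← hSdef, hlen1]; omega)
          rw [hidx1, htake1, PySem.Set.ofList_append_singleton, ← hSdef,
            hlen1, h0, hwin] at hres
          have hneed : 2 ^ K - S.length - 1 = 2 ^ K - (S.length + 1) := by omega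
          rw [hneed]
          exact hres
    · have hdecf : decide ((K : Int) - 1 ≤ (pre.length : Int)) = false := decide_eq_false hcond
      rw [hdecf]
      simp only [Bool.false_and, Bool.false_eq_true, if_false]
      have hidx : (pre ++ [c]).length - (K - 1) = pre.length - (K - 1) := by
        rw [h0]; omega
      have hres := ih (pre ++ [c]) h' (by rw [hidx]; exact hfull)
      rw [hidx, h0] at hres
      exact hres

-- B's inner fold over Int equals the Nat window value, cast
lemma pv_ival (l : List Char) (a : Nat) :
    l.foldl (fun v c => v * 2 + (if c = '1' then 1 else 0)) ((a : Nat) : Int)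
      = ((l.foldl (fun v c => 2 * v + pvBit c) a : Nat) : Int) := by
  induction l generalizing a with
  | nil => simp
  | cons c l ih =>
    simp only [List.foldl_cons]
    have hstep : ((a : Nat) : Int) * 2 + (if c = '1' then 1 else 0)
        = (((2 * a + pvBit c : Nat)) : Int) := by
      unfold pvBit; split <;> push_cast <;> ring
    rw [hstep, ih]

lemma pv_ofList_map_cast (xs : List Nat) :
    PySem.Set.ofList (xs.map Int.ofNat) = (PySem.Set.ofList xs).map Int.ofNat := by
  induction xs using List.reverseRecOn with
  | nil => rfl
  | append_singleton xs x ih =>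
    rw [List.map_append, List.map_singleton, PySem.Set.ofList_append_singleton,
      PySem.Set.ofList_append_singleton, ih]
    by_cases hm : x ∈ PySem.Set.ofList xs
    · rw [PySem.Set.add_of_mem hm, PySem.Set.add_of_mem]
      exact List.mem_map_of_mem hm
    · rw [PySem.Set.add_of_not_mem hm, PySem.Set.add_of_not_mem, List.map_append,
        List.map_singleton]
      intro hc
      obtain ⟨y, hy, hxy⟩ := List.mem_map.mp hc
      exact hm (Int.ofNat.inj hxy ▸ hy)

-- B, past the guard, counts the distinct window values
lemma pv_alt_eq (s : String) (k : Int) (K : Nat) (hk : k = (K : Int))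
    (hg : ¬((s.toList.length : Int) - k + 1 < ((1 <<< k.toNat : Nat) : Int))) :
    has_all_codes_bits_alt s k = decide ((PySem.Set.ofList (pvVals s.toList K)).length = 2 ^ K) := by
  unfold has_all_codes_bits_alt
  rw [if_neg (by exact_mod_cast hg)]
  rw [← PySem.Set.update_map_eq_foldl_add, PySem.Set.update_empty]
  have hmap : (PySem.List.pyRange 0 ((s.toList.length : Int) - k + 1) 1).map
      (fun i => (PySem.List.slice s.toList (some i) (some (i + k))).foldl
        (fun v c => v * 2 + (if c = '1' then 1 else 0)) (0 : Int))
      = (pvVals s.toList K).map Int.ofNat := by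
    rw [PySem.List.pyRange_one, List.map_map]
    have hlenv : ((s.toList.length : Int) - k + 1 - 0).toNat = s.toList.length + 1 - K := by
      omega
    rw [hlenv]
    unfold pvVals
    rw [List.map_map]
    apply List.map_congr_left
    intro j hj
    rw [List.mem_range] at hj
    show (PySem.List.slice s.toList (some (0 + (j : Int))) (some (0 + (j : Int) + k))).foldl
        (fun v c => v * 2 + (if c = '1' then 1 else 0)) (0 : Int)
      = Int.ofNat (pvWv ((s.toList.drop j).take K))
    have e2 : (0 : Int) + (j : Int) + k = ((j : Int) + ((K : Nat) : Int)) := by rw [hk]; ring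
    have e1 : (0 : Int) + (j : Int) = ((j : Nat) : Int) := by simp
    rw [e2, e1, PySem.List.slice_natCast_add]
    exact pv_ival _ 0
  rw [hmap, pv_ofList_map_cast]
  show (((List.map Int.ofNat (PySem.Set.ofList (pvVals s.toList K))).length : Int)
      == ((1 <<< k.toNat : Nat) : Int))
    = decide ((PySem.Set.ofList (pvVals s.toList K)).length = 2 ^ K)
  rw [List.length_map]
  have htot : ((1 <<< k.toNat : Nat) : Int) = ((2 ^ K : Nat) : Int) := by
    subst hk
    rw [Nat.shiftLeft_eq, one_mul, Int.toNat_natCast]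
  rw [htot]
  by_cases hlen : (PySem.Set.ofList (pvVals s.toList K)).length = 2 ^ K
  · rw [hlen]; simp
  · rw [decide_eq_false hlen]
    simp
    exact_mod_cast hlen

lemma pv_ofList_replicate (n : Nat) (x : Nat) :
    PySem.Set.ofList (List.replicate (n + 1) x) = [x] := by
  induction n with
  | zero => rfl
  | succ n ih =>
    rw [List.replicate_succ, PySem.Set.ofList_cons, ih]
    have hd : PySem.Set.discard [x] x = ([] : List Nat) := by
      apply List.eq_nil_iff_forall_not_mem.mpr
      intro y hy
      rw [PySem.Set.mem_discard] at hy
      rcases hy with ⟨hy1, hy2⟩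
      simp at hy1
      exact hy2 hy1
    rw [hd]

lemma pv_alt_guard (s : String) (k : Int)
    (hg : (s.toList.length : Int) - k + 1 < ((1 <<< k.toNat : Nat) : Int)) :
    has_all_codes_bits_alt s k = false := by
  unfold has_all_codes_bits_alt
  rw [if_pos (by exact_mod_cast hg)]

lemma pv_main : ∀ (s : String) (k : Int), Pre_has_all_codes_bits s k → ¬ D_has_all_codes_bits s k →
    has_all_codes_bits s k = has_all_codes_bits_alt s k := by
  intro s k hpre hd
  obtain ⟨hk0, hp2⟩ := hpre
  obtain ⟨K, rfl⟩ : ∃ K : Nat, k = (K : Int) := ⟨k.toNat, by omega⟩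
  by_cases hg : (s.toList.length : Int) - (K : Int) + 1 < ((1 <<< ((K : Int)).toNat : Nat) : Int)
  · unfold has_all_codes_bits
    rw [if_pos hg, pv_alt_guard s _ (by exact_mod_cast hg)]
  · rw [pv_alt_eq s _ K rfl hg]
    unfold has_all_codes_bits
    rw [if_neg hg]
    simp only [Int.toNat_natCast]
    by_cases hK0 : K = 0
    · subst hK0
      -- k = 0: Pre_ gives that s does not start with '1', ¬D_ gives s ≠ ""
      have hs : s ≠ "" := fun h => hd ⟨h, rfl⟩
      have hl : s.toList ≠ [] := by
        intro h
        exact hs (by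
          have := congrArg String.ofList h
          simpa using this)
      obtain ⟨c, tl, hct⟩ : ∃ c tl, s.toList = c :: tl := by
        cases hcl : s.toList with
        | nil => exact absurd hcl hl
        | cons a b => exact ⟨a, b, rfl⟩
      have hc : c ≠ '1' := by
        intro h1
        apply hp2
        refine ⟨rfl, ?_⟩
        rw [hct, h1]
        rfl
      have hvals : pvVals s.toList 0 = List.replicate (s.toList.length + 1) 0 := by
        unfold pvVals
        rw [Nat.sub_zero]
        have hf : (fun j => pvWv ((s.toList.drop j).take 0)) = fun _ : Nat => (0 : Nat) := by
          funext j
          rw [List.take_zero]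
          rfl
        rw [hf, List.map_const', List.length_range]
      rw [hvals]
      have hrep := pv_ofList_replicate s.toList.length 0
      rw [hrep]
      rw [hct]
      simp [pyAllCodesLoop, hc]
    · have hK : 1 ≤ K := by omega
      have hsh : (1 : Nat) <<< K = 2 ^ K := by rw [Nat.shiftLeft_eq, one_mul]
      rw [hsh]
      have h0 : (PySem.Set.ofList ((pvVals s.toList K).take (0 - (K - 1)))) = [] := by
        have hz : (0 : Nat) - (K - 1) = 0 := by omega
        rw [hz, List.take_zero]
        rfl
      have hloop := pv_loop ((K : Nat) : Int) K rfl hK s.toList s.toList [] rfl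
        (by
          show (PySem.Set.ofList ((pvVals s.toList K).take (List.length [] - (K - 1)))).length < 2 ^ K
          rw [List.length_nil, h0]
          positivity)
      simp only [List.length_nil] at hloop
      rw [h0] at hloop
      have hwv0 : pvWv ([] : List Char) % 2 ^ K = 0 := Nat.zero_mod _
      rw [hwv0] at hloop
      simp only [List.length_nil, Nat.sub_zero] at hloop
      have hrepl : List.replicate (2 ^ K) false
          = (List.range (2 ^ K)).map (fun x => PySem.Set.contains ([] : PySem.Set Nat) x) := by
        have hcf : (fun x : Nat => PySem.Set.contains ([] : PySem.Set Nat) x)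
            = fun _ : Nat => false := rfl
        rw [hcf, List.map_const', List.length_range]
      rw [hrepl]
      exact hloop

-- ===== VERDICT (by name: the statement is the Claim_ definition above) =====
theorem has_all_codes_bits_spec : Claim_unchanged_has_all_codes_bits := by
  intro s k _ hpre hd
  exact pv_main s k hpre hd

theorem has_all_codes_bits_changed : Claim_changed_has_all_codes_bits := by
  unfold Claim_changed_has_all_codes_bits; decide

theorem has_all_codes_bits_tight : Claim_exact_has_all_codes_bits := by
  intro s k _ _ hd
  obtain ⟨hs, hk⟩ := hd
  subst hs; subst hk; decide
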